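-- pv_equiv track=rewrite | github.com/beytullaharslannn/SOC-Advanced-Toolkit | crypto_module.py | uuencode_enc
-- ===== SOURCE A (Python) =====
-- def safe_encode(text: str) -> bytes:
--     return text.encode("utf-8")
--
-- def uuencode_enc(t):
--     import io
--     data = safe_encode(t); out = io.BytesIO()
--     out.write(b"begin 644 file\n")
--     for i in range(0, len(data), 45):
--         chunk = data[i:i+45]
--         line = bytes([len(chunk) + 32])
--         for j in range(0, len(chunk), 3):
--             triple = chunk[j:j+3].ljust(3, b'\x00')
--             line += bytes([
--                 ((triple[0] >> 2) & 63) + 32,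
--                 (((triple[0] & 3) << 4) | ((triple[1] >> 4) & 15)) + 32,
--                 (((triple[1] & 15) << 2) | ((triple[2] >> 6) & 3)) + 32,
--                 (triple[2] & 63) + 32,
--             ])
--         out.write(line + b"\n")
--     out.write(b"`\nend\n")
--     return out.getvalue().decode()
-- ===== SOURCE B (Python) =====
-- def safe_encode(text: str) -> bytes:
--     return text.encode("utf-8")
--
-- def uuencode_enc(t):
--     data = safe_encode(t)
--     padded = data + b"\x00" * ((3 - len(data) % 3) % 3)
--     # one flat pass: pack each 3-byte group into a 24-bit number and peel off
--     # four base-64 digits arithmetically (no bit masks, no per-chunk slicing)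
--     groups = []
--     for k in range(0, len(padded), 3):
--         n = (padded[k] * 256 + padded[k + 1]) * 256 + padded[k + 2]
--         groups.append(chr(n // 262144 % 64 + 32) + chr(n // 4096 % 64 + 32)
--                       + chr(n // 64 % 64 + 32) + chr(n % 64 + 32))
--     flat = "".join(groups)
--     # second pass: cut the flat digit stream into length-prefixed lines
--     lines = []
--     rem = len(data)
--     pos = 0
--     while rem > 0:
--         cnt = min(45, rem)
--         lines.append(chr(cnt + 32) + flat[pos : pos + 4 * ((cnt + 2) // 3)] + "\n")
--         pos += 60
--         rem -= cnt
--     return "begin 644 file\n" + "".join(lines) + "`\nend\n"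
-- ===== Notes on version B (the rewrite author's own statement) =====
-- stated objective: alternative
-- what changed: A nests a per-45-byte-chunk loop with an inner per-triple bit-mask/shift loop that slices and zero-pads each chunk; B encodes the whole zero-padded input once by packing each 3-byte group into a 24-bit integer and peeling base-64 digits off with division/modulus, then cuts that flat digit stream into length-prefixed 60-char lines in a second pass.
import Mathlib
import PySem

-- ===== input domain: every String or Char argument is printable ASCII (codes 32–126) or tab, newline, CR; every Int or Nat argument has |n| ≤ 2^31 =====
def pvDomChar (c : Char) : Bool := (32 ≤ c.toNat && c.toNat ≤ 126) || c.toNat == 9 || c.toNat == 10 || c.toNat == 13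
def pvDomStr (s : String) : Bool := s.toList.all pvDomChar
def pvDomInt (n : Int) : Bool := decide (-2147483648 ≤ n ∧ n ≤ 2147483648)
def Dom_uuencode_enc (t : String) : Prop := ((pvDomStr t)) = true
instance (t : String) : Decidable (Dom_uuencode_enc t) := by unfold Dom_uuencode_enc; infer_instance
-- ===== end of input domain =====

-- B replaces A's nested per-chunk/per-triple bit-mask loops by one flat pass that packs each
-- 3-byte group into a 24-bit integer and peels base-64 digits off by division/modulus, followed
-- by one line-chunking pass (objective: alternative).


-- ===== PORT A =====
-- the four encoded chars of one 3-byte triple (A's inner loop body, masks as written)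
def encTripleA (a b c : Nat) : List Char :=
  [Char.ofNat (((a >>> 2) &&& 63) + 32),
   Char.ofNat ((((a &&& 3) <<< 4) ||| ((b >>> 4) &&& 15)) + 32),
   Char.ofNat ((((b &&& 15) <<< 2) ||| ((c >>> 6) &&& 3)) + 32),
   Char.ofNat ((c &&& 63) + 32)]

-- A's inner loop: for j in range(0,len(chunk),3): triple = chunk[j:j+3].ljust(3, 0)
def encLineA : List Nat → List Char
  | [] => []
  | [a] => encTripleA a 0 0
  | [a, b] => encTripleA a b 0
  | a :: b :: c :: rest => encTripleA a b c ++ encLineA rest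

-- A's outer loop: for i in range(0, len(data), 45): chunk = data[i:i+45]
-- (fuel = data.length, a structural totality guard; the loop consumes ≥ 1 byte per turn)
def encA : Nat → List Nat → List Char
  | _, [] => []
  | 0, _ => []
  | fuel + 1, data =>
      Char.ofNat ((data.take 45).length + 32) ::
        (encLineA (data.take 45) ++ '\n' :: encA fuel (data.drop 45))

-- text.encode("utf-8") on the ASCII domain: each char becomes its code point (exact on Dom)
def uuencode_enc (t : String) : String :=
  let data := t.toList.map Char.toNat
  "begin 644 file\n" ++ String.mk (encA data.length data) ++ "`\nend\n"

-- ===== PORT B =====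
-- one 3-byte group packed as a 24-bit number; its four base-64 digits, by division/modulus
def encGroupB (n : Nat) : List Char :=
  [Char.ofNat (n / 262144 % 64 + 32), Char.ofNat (n / 4096 % 64 + 32),
   Char.ofNat (n / 64 % 64 + 32), Char.ofNat (n % 64 + 32)]

-- Source B's flat pass: pack three bytes at a time over the zero-padded input
def encFlatB : List Nat → List Char
  | a :: b :: c :: rest => encGroupB ((a * 256 + b) * 256 + c) ++ encFlatB rest
  | _ => []

-- (3 - n % 3) % 3, the zero-padding length
def padB (n : Nat) : Nat := (3 - n % 3) % 3

-- Source B's while loop: slice flat[pos : pos + 4*((cnt+2)//3)], pos += 60, rem -= cnt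
-- (fuel = rem, a structural totality guard; rem strictly decreases while nonzero)
def chunkLinesB : Nat → List Char → Nat → List Char
  | 0, _, _ => []
  | fuel + 1, flat, rem =>
      if rem = 0 then []
      else
        Char.ofNat (min 45 rem + 32) ::
          (flat.take (4 * ((min 45 rem + 2) / 3)) ++
            '\n' :: chunkLinesB fuel (flat.drop 60) (rem - min 45 rem))

def uuencode_enc_alt (t : String) : String :=
  let data := t.toList.map Char.toNat
  "begin 644 file\n" ++
    String.mk (chunkLinesB data.length
      (encFlatB (data ++ List.replicate (padB data.length) 0)) data.length) ++ "`\nend\n"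

-- ===== PRECONDITION & SPEC =====
def Spec_uuencode_enc (t : String) (out : String) : Prop := out = uuencode_enc_alt t
instance (t : String) (out : String) : Decidable (Spec_uuencode_enc t out) := by unfold Spec_uuencode_enc; infer_instance

-- ===== CLAIM (what is proved, stated in full; the proofs are below) =====
def Claim_equal_uuencode_enc : Prop := ∀ (t : String), Dom_uuencode_enc t → Spec_uuencode_enc t (uuencode_enc t)

-- ===== LEMMAS AND PROOFS =====

-- disjoint bitwise-or is addition (only the two fixed shapes A uses; 64 cases each)
theorem or16_eq_add : ∀ u < 4, ∀ y < 16, ((u * 16) ||| y) = u * 16 + y := by decide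
theorem or4_eq_add : ∀ v < 16, ∀ z < 4, ((v * 4) ||| z) = v * 4 + z := by decide

-- A's mask/shift triple equals B's base-64 digit extraction, for byte-sized inputs
theorem encTripleA_eq_group (a b c : Nat) (_ha : a < 256) (hb : b < 256) (hc : c < 256) :
    encTripleA a b c = encGroupB ((a * 256 + b) * 256 + c) := by
  have m6 : ∀ x : Nat, x &&& 63 = x % 64 := fun x => Nat.and_two_pow_sub_one_eq_mod x 6
  have m4 : ∀ x : Nat, x &&& 15 = x % 16 := fun x => Nat.and_two_pow_sub_one_eq_mod x 4
  have m2 : ∀ x : Nat, x &&& 3 = x % 4 := fun x => Nat.and_two_pow_sub_one_eq_mod x 2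
  unfold encTripleA encGroupB
  rw [Nat.shiftRight_eq_div_pow a 2, Nat.shiftRight_eq_div_pow b 4,
    Nat.shiftRight_eq_div_pow c 6, m6, m6, m4, m2, m2, m4,
    Nat.shiftLeft_eq (a % 4) 4, Nat.shiftLeft_eq (b % 16) 2,
    show (2:Nat)^4 = 16 from rfl, show (2:Nat)^2 = 4 from rfl,
    show (2:Nat)^6 = 64 from rfl,
    or16_eq_add (a % 4) (by omega) (b / 16 % 16) (by omega),
    or4_eq_add (b % 16) (by omega) (c / 64 % 4) (by omega)]
  have e1 : a / 4 % 64 = ((a * 256 + b) * 256 + c) / 262144 % 64 := by omega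
  have e2 : a % 4 * 16 + b / 16 % 16 = ((a * 256 + b) * 256 + c) / 4096 % 64 := by omega
  have e3 : b % 16 * 4 + c / 64 % 4 = ((a * 256 + b) * 256 + c) / 64 % 64 := by omega
  have e4 : c % 64 = ((a * 256 + b) * 256 + c) % 64 := by omega
  rw [e1, e2, e3, e4]

theorem encLineA_eq_flat (xs : List Nat) (hx : ∀ x ∈ xs, x < 256) :
    encLineA xs = encFlatB (xs ++ List.replicate (padB xs.length) 0) := by
  induction xs using encLineA.induct with
  | case1 => simp [encLineA, encFlatB, padB]
  | case2 a =>
      have := hx a (by simp)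
      simp [encLineA, encFlatB, padB,
        encTripleA_eq_group a 0 0 this (by omega) (by omega)]
  | case3 a b =>
      have ha := hx a (by simp); have hb := hx b (by simp)
      simp [encLineA, encFlatB, padB,
        encTripleA_eq_group a b 0 ha hb (by omega)]
  | case4 a b c rest ih =>
      have ha := hx a (by simp); have hb := hx b (by simp); have hc := hx c (by simp)
      have hpad : padB (rest.length + 3) = padB rest.length := by
        unfold padB; omega
      simp only [encLineA, List.cons_append, encFlatB, List.length_cons]
      rw [show rest.length + 1 + 1 + 1 = rest.length + 3 by omega, hpad,
        ih (fun x hxm => hx x (by simp [hxm])),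
        encTripleA_eq_group a b c ha hb hc]

theorem encFlatB_length (xs : List Nat) :
    (encFlatB xs).length = 4 * (xs.length / 3) := by
  induction xs using encFlatB.induct with
  | case1 a b c rest ih =>
      simp only [encFlatB, List.length_append, List.length_cons, ih, encGroupB]
      simp; omega
  | case2 t h1 =>
      rcases t with _ | ⟨a, _ | ⟨b, _ | ⟨c, rest⟩⟩⟩
      · simp [encFlatB]
      · simp [encFlatB]
      · simp [encFlatB]
      · exact absurd rfl (h1 a b c rest)

theorem encFlatB_append (xs ys : List Nat) (h : xs.length % 3 = 0) :
    encFlatB (xs ++ ys) = encFlatB xs ++ encFlatB ys := by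
  induction xs using encFlatB.induct with
  | case1 a b c rest ih =>
      simp only [List.length_cons] at h
      simp only [List.cons_append, encFlatB, List.append_assoc]
      rw [ih (by omega)]
  | case2 t h1 =>
      rcases t with _ | ⟨a, _ | ⟨b, _ | ⟨c, rest⟩⟩⟩
      · simp [encFlatB]
      · simp at h
      · simp at h
      · exact absurd rfl (h1 a b c rest)

theorem chunkLinesB_zero (fuel : Nat) (flat : List Char) :
    chunkLinesB fuel flat 0 = [] := by
  cases fuel <;> simp [chunkLinesB]

theorem mainEq (fuel : Nat) (data : List Nat) (hf : data.length ≤ fuel)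
    (hx : ∀ x ∈ data, x < 256) :
    encA fuel data
      = chunkLinesB fuel (encFlatB (data ++ List.replicate (padB data.length) 0))
          data.length := by
  induction fuel generalizing data with
  | zero =>
      have : data = [] := by
        cases data with
        | nil => rfl
        | cons a l => simp at hf
      subst this; simp [encA, chunkLinesB]
  | succ fuel ih =>
      cases data with
      | nil => simp [encA, chunkLinesB]
      | cons d0 drest =>
      set data := d0 :: drest with hdata
      have h0 : 0 < data.length := by simp [hdata]
      rw [show encA (fuel + 1) data
            = Char.ofNat ((data.take 45).length + 32) ::
                (encLineA (data.take 45) ++ '\n' :: encA fuel (data.drop 45)) from rfl,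
        chunkLinesB, if_neg (by omega)]
      rw [List.length_take]
      by_cases h45 : 45 ≤ data.length
      · -- full line: cnt = 45, the first 60 flat chars form this line
        have hmin : min 45 data.length = 45 := by omega
        have htk : (data.take 45).length = 45 := by simp [List.length_take]; omega
        have hpad : padB data.length = padB (data.drop 45).length := by
          simp only [List.length_drop]; unfold padB; omega
        have hsplit : data ++ List.replicate (padB data.length) 0
            = data.take 45 ++ ((data.drop 45) ++ List.replicate (padB (data.drop 45).length) 0) := by
          rw [hpad, ← List.append_assoc, List.take_append_drop]
        rw [hsplit, encFlatB_append _ _ (by rw [htk])]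
        have hlen60 : (encFlatB (data.take 45)).length = 60 := by
          rw [encFlatB_length, htk]
        rw [hmin, show (4 : ℕ) * ((45 + 2) / 3) = 60 from rfl,
          List.take_left' hlen60, List.drop_left' hlen60]
        have hfl : (data.drop 45).length ≤ fuel := by
          simp only [List.length_drop]; omega
        rw [show data.length - 45 = (data.drop 45).length by simp [List.length_drop],
          ← ih (data.drop 45) hfl (fun x hm => hx x (List.drop_subset 45 data hm)),
          encLineA_eq_flat _ (fun x hm => hx x (List.take_subset 45 data hm))]
        rw [htk, show padB 45 = 0 from rfl]
        simp
      · -- last partial line: cnt = data.length, all remaining flat chars form it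
        have hmin : min 45 data.length = data.length := by omega
        have htk : data.take 45 = data := List.take_of_length_le (by omega)
        have hdr : data.drop 45 = [] := List.drop_eq_nil_of_le (by omega)
        have hflen : (encFlatB (data ++ List.replicate (padB data.length) 0)).length
            = 4 * ((data.length + 2) / 3) := by
          rw [encFlatB_length]; simp [List.length_append]; unfold padB; omega
        rw [hmin, htk, hdr]
        rw [List.take_of_length_le (le_of_eq hflen),
          List.drop_eq_nil_of_le (by rw [hflen]; omega), Nat.sub_self]
        rw [encLineA_eq_flat _ hx, chunkLinesB_zero]
        cases fuel <;> simp [encA]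

-- ===== VERDICT (by name: the statement is the Claim_ definition above) =====
theorem uuencode_enc_spec : Claim_equal_uuencode_enc := by
  intro t hdom
  have hx : ∀ x ∈ t.toList.map Char.toNat, x < 256 := by
    intro x hm
    simp only [List.mem_map] at hm
    obtain ⟨c, hc, rfl⟩ := hm
    have hc2 := (List.all_eq_true.mp hdom) c hc
    simp only [pvDomChar, Bool.or_eq_true, Bool.and_eq_true, decide_eq_true_eq,
      beq_iff_eq] at hc2
    omega
  unfold Spec_uuencode_enc
  simp only [uuencode_enc, uuencode_enc_alt]
  rw [mainEq _ _ le_rfl hx]
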